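-- pv_equiv track=rewrite | github.com/natalia-sitek/udemy-python-tutorial2 | Methods_and_Functions/level_2_problems.py | summer_69
-- ===== SOURCE A (Python) =====
-- def summer_69(arr):
--     should_add = True
--     myres = 0
--     for a in arr:
--         if a == 6:
--             should_add = False
--         if should_add:
--             myres = myres + a
--         if a == 9:
--             should_add = True
--     return (myres)
-- ===== SOURCE B (Python) =====
-- def summer_69(arr):
--     total = 0
--     i = 0
--     n = len(arr)
--     while i < n:
--         if arr[i] == 6:
--             # skip the excluded run up to (and including) the next 9
--             while i < n and arr[i] != 9:
--                 i += 1
--             i += 1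
--         else:
--             total += arr[i]
--             i += 1
--     return total
-- ===== Notes on version B (the rewrite author's own statement) =====
-- stated objective: alternative
-- what changed: Replaced A's flag-toggled single pass by a scan with an explicit nested skip loop: on a 6 an inner while skips forward to the closing 9 (consuming it); otherwise the element is accumulated, so no boolean state is carried.
import Mathlib
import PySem

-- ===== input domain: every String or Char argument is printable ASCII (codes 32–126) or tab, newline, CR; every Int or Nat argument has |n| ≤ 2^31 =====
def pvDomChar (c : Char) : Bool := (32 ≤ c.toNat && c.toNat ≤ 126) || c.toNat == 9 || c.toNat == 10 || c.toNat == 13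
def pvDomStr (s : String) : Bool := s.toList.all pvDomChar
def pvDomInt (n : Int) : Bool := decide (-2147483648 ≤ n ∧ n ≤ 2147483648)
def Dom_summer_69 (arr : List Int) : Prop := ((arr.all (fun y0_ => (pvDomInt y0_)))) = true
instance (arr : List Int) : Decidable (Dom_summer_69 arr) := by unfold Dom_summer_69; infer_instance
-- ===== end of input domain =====

-- B replaces A's boolean flag with an explicit nested skip: same values, different control structure.

-- ===== PORT A =====
-- literal port of A: fold over arr carrying (should_add, myres)
def summer_69 (arr : List Int) : Int :=
  (arr.foldl (fun (st : Bool × Int) a =>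
      let sa := if a = 6 then false else st.1
      let r := if sa then st.2 + a else st.2
      let sa2 := if a = 9 then true else sa
      (sa2, r)) (true, 0)).2

-- ===== PORT B =====
-- inner while loop of B: skip forward to the first 9 and consume it ([] if none)
def pvSkipTo9 : List Int → List Int
  | [] => []
  | a :: rest => if a = 9 then rest else pvSkipTo9 rest

theorem pvSkipTo9_length_le : ∀ (xs : List Int), (pvSkipTo9 xs).length ≤ xs.length
  | [] => Nat.le_refl _
  | a :: rest => by
      simp only [pvSkipTo9]
      split
      · exact Nat.le_succ _
      · exact Nat.le_trans (pvSkipTo9_length_le rest) (Nat.le_succ _)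

-- outer loop of B as recursion on the remaining suffix
def summer_69_alt : List Int → Int
  | [] => 0
  | a :: rest =>
      if a = 6 then summer_69_alt (pvSkipTo9 rest)
      else a + summer_69_alt rest
termination_by xs => xs.length
decreasing_by
  · exact Nat.lt_succ_of_le (pvSkipTo9_length_le rest)
  · exact Nat.lt_succ_self _

-- ===== PRECONDITION & SPEC =====
def Spec_summer_69 (arr : List Int) (out : Int) : Prop := out = summer_69_alt arr
instance (arr : List Int) (out : Int) : Decidable (Spec_summer_69 arr out) := by unfold Spec_summer_69; infer_instance

-- ===== CLAIM (what is proved, stated in full; the proofs are below) =====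
def Claim_equal_summer_69 : Prop := ∀ (arr : List Int), Dom_summer_69 arr → Spec_summer_69 arr (summer_69 arr)

-- ===== LEMMAS AND PROOFS =====

def pvStepA (st : Bool × Int) (a : Int) : Bool × Int :=
  let sa := if a = 6 then false else st.1
  let r := if sa then st.2 + a else st.2
  let sa2 := if a = 9 then true else sa
  (sa2, r)

theorem summer_69_eq_foldl (arr : List Int) :
    summer_69 arr = (arr.foldl pvStepA (true, 0)).2 := rfl

-- in the flag-false state, A skips everything up to and including the first 9
theorem foldA_false (arr : List Int) (r : Int) :
    (arr.foldl pvStepA (false, r)).2 = ((pvSkipTo9 arr).foldl pvStepA (true, r)).2 := by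
  induction arr generalizing r with
  | nil =>
      simp [pvSkipTo9, List.foldl]
  | cons a rest ih =>
      by_cases h9 : a = 9
      · simp [pvSkipTo9, List.foldl, pvStepA, h9]
      · by_cases h6 : a = 6 <;>
          simp [pvSkipTo9, List.foldl, pvStepA, h9, h6, ih]

-- in the flag-true state, A computes r + B's skip-scan result
theorem foldA_true : ∀ (arr : List Int) (r : Int),
    (arr.foldl pvStepA (true, r)).2 = r + summer_69_alt arr
  | [], r => by simp [List.foldl, summer_69_alt]
  | a :: rest, r => by
      by_cases h6 : a = 6
      · have := foldA_true (pvSkipTo9 rest) r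
        simp [List.foldl, pvStepA, h6, summer_69_alt, foldA_false, this]
      · have := foldA_true rest (r + a)
        simp [List.foldl, pvStepA, h6, summer_69_alt, this]
        ring
termination_by arr => arr.length
decreasing_by
  · exact Nat.lt_succ_of_le (pvSkipTo9_length_le rest)
  · exact Nat.lt_succ_self _

-- ===== VERDICT (by name: the statement is the Claim_ definition above) =====
theorem summer_69_spec : Claim_equal_summer_69 := by
  intro arr _
  unfold Spec_summer_69
  rw [summer_69_eq_foldl, foldA_true]
  simp
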